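-- pv_equiv track=rewrite | github.com/jccriado/matchingtools | matchingtools/matches.py | _map_tensor_indices
-- ===== SOURCE A (Python) =====
-- def _map_tensor_indices(I, J):
--     if len(I) != len(J):
--         return None
--
--     mapping = {}
--     for i, j in zip(I, J):
--         if i in mapping and mapping[i] != j:
--             # unable to match the indices: incoherence reached
--             return None
--         else:
--             # unknown index yet. try with the obvious mapping and
--             # wait for an incoherence later on.
--             mapping[i] = j
--
--     return mapping
-- ===== SOURCE B (Python) =====
-- def _map_tensor_indices(I, J):
--     if len(I) != len(J):
--         return None
--     pairs = set(zip(I, J))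
--     if len({i for i, _ in pairs}) != len(pairs):
--         return None
--     return dict(zip(I, J))
-- ===== Notes on version B (the rewrite author's own statement) =====
-- stated objective: alternative
-- what changed: Replaces A's dict build with per-element membership/lookup consistency checks by a set-cardinality argument: the mapping is consistent iff the set of distinct (i, j) pairs has as many distinct keys as elements, after which dict(zip(I, J)) is the answer.
import Mathlib
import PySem

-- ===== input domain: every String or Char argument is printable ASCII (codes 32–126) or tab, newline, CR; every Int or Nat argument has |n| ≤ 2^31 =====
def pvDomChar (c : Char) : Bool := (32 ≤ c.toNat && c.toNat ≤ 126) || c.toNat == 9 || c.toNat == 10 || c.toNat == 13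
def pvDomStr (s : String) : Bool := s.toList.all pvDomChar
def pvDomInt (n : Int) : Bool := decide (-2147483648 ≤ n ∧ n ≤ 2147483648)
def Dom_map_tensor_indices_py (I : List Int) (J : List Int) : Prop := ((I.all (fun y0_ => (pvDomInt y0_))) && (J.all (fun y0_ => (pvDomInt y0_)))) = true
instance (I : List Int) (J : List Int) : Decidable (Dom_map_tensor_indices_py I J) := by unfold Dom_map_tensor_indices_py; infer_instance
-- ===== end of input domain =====

-- B replaces A's incremental build-with-lookup-checks by a set-cardinality consistency test
-- (the pairing is consistent iff the distinct (i, j) pairs have pairwise distinct keys,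
-- i.e. |set(zip(I, J))| = |{i for (i, _) in that set}|), then returns dict(zip(I, J));
-- objective: alternative.

-- ===== PORT A =====
-- the 'for i, j in zip(I, J)' loop with early return: structural recursion over the zipped pairs
def goA_map_tensor_indices : PySem.Dict Int Int → List (Int × Int) → Option (PySem.Dict Int Int)
  | d, [] => some d
  | d, (i, j) :: rest =>
    if d.contains i ∧ d.get? i ≠ some j then none
    else goA_map_tensor_indices (d.insert i j) rest

def map_tensor_indices_py (I : List Int) (J : List Int) : Option (List (Int × Int)) :=
  if I.length ≠ J.length then none
  else (goA_map_tensor_indices PySem.Dict.empty (I.zip J)).map (fun d => d.items)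

-- ===== PORT B =====
def map_tensor_indices_py_alt (I : List Int) (J : List Int) : Option (List (Int × Int)) :=
  if I.length ≠ J.length then none
  else
    -- pairs = set(zip(I, J))
    let pairs : PySem.Set (Int × Int) := PySem.Set.ofList (I.zip J)
    -- {i for i, _ in pairs}: a set built from a set, compared only by cardinality (order-independent)
    if (PySem.Set.ofList (pairs.map Prod.fst)).length ≠ pairs.length then none
    else some (PySem.Dict.ofList (I.zip J)).items

-- ===== PRECONDITION & SPEC =====
def Spec_map_tensor_indices_py (I : List Int) (J : List Int) (out : Option (List (Int × Int))) : Prop := out = map_tensor_indices_py_alt I J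
instance (I : List Int) (J : List Int) (out : Option (List (Int × Int))) : Decidable (Spec_map_tensor_indices_py I J out) := by unfold Spec_map_tensor_indices_py; infer_instance

-- ===== CLAIM (what is proved, stated in full; the proofs are below) =====
def Claim_equal_map_tensor_indices_py : Prop := ∀ (I : List Int) (J : List Int), Dom_map_tensor_indices_py I J → Spec_map_tensor_indices_py I J (map_tensor_indices_py I J)

-- ===== LEMMAS AND PROOFS =====

-- "the dict d is consistent with the pairs still to process, and the pairs are consistent among themselves"
def GoodMTI (d : PySem.Dict Int Int) (pairs : List (Int × Int)) : Prop :=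
  (∀ p ∈ pairs, d.get? p.1 = none ∨ d.get? p.1 = some p.2) ∧
  pairs.Pairwise (fun p q => p.1 = q.1 → p.2 = q.2)

lemma goodMTI_step (d : PySem.Dict Int Int) (i j : Int) (t : List (Int × Int))
    (hg : ¬ (d.contains i ∧ d.get? i ≠ some j)) :
    GoodMTI (d.insert i j) t ↔ GoodMTI d ((i, j) :: t) := by
  have hhead : d.get? i = none ∨ d.get? i = some j := by
    by_cases hc : d.contains i = true
    · right
      by_contra hne
      exact hg ⟨hc, hne⟩
    · left
      rw [PySem.Dict.get?_eq_none_iff_contains]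
      exact eq_false_of_ne_true hc
  constructor
  · rintro ⟨hC, hPW⟩
    refine ⟨?_, ?_⟩
    · intro p hp
      rcases List.mem_cons.mp hp with hp | hp
      · subst hp; exact hhead
      · by_cases hpi : p.1 = i
        · have := hC p hp
          rw [hpi, PySem.Dict.get?_insert_self] at this
          rcases this with h | h
          · exact absurd h (by simp)
          · have hj : j = p.2 := by simpa using h
            rw [hpi, ← hj]; exact hhead
        · have := hC p hp
          rwa [PySem.Dict.get?_insert_of_ne _ _ hpi] at this
    · rw [List.pairwise_cons]
      refine ⟨?_, hPW⟩
      intro p hp heq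
      have := hC p hp
      rw [show p.1 = i from heq.symm, PySem.Dict.get?_insert_self] at this
      rcases this with h | h
      · exact absurd h (by simp)
      · simpa using h
  · rintro ⟨hC, hPW⟩
    rw [List.pairwise_cons] at hPW
    refine ⟨?_, hPW.2⟩
    intro p hp
    by_cases hpi : p.1 = i
    · right
      rw [hpi, PySem.Dict.get?_insert_self]
      have : j = p.2 := hPW.1 p hp hpi.symm
      rw [this]
    · rw [PySem.Dict.get?_insert_of_ne _ _ hpi]
      exact hC p (List.mem_cons_of_mem _ hp)

lemma goA_of_good : ∀ (pairs : List (Int × Int)) (d : PySem.Dict Int Int),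
    GoodMTI d pairs →
    goA_map_tensor_indices d pairs = some (pairs.foldl (fun d p => d.insert p.1 p.2) d) := by
  intro pairs
  induction pairs with
  | nil => intro d _; rfl
  | cons a t ih =>
    intro d hG
    obtain ⟨i, j⟩ := a
    have hhead := hG.1 (i, j) (List.mem_cons_self)
    have hg : ¬ (d.contains i = true ∧ d.get? i ≠ some j) := by
      rintro ⟨hc, hne⟩
      rcases hhead with h | h
      · rw [PySem.Dict.get?_eq_none_iff_contains] at h
        rw [h] at hc; exact Bool.false_ne_true hc
      · exact hne h
    rw [goA_map_tensor_indices, if_neg hg, List.foldl_cons]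
    exact ih _ ((goodMTI_step d i j t hg).mpr hG)

lemma goA_of_not_good : ∀ (pairs : List (Int × Int)) (d : PySem.Dict Int Int),
    ¬ GoodMTI d pairs → goA_map_tensor_indices d pairs = none := by
  intro pairs
  induction pairs with
  | nil =>
    intro d hG
    exact absurd ⟨by simp, List.Pairwise.nil⟩ hG
  | cons a t ih =>
    intro d hG
    obtain ⟨i, j⟩ := a
    by_cases hg : d.contains i = true ∧ d.get? i ≠ some j
    · rw [goA_map_tensor_indices, if_pos hg]
    · rw [goA_map_tensor_indices, if_neg hg]
      refine ih _ (fun hG' => hG ?_)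
      exact (goodMTI_step d i j t hg).mp hG'

-- PySem's first-occurrence dedup is a permutation of Mathlib's List.dedup, so their lengths agree
lemma length_ofList_eq_dedup {α : Type} [DecidableEq α] (l : List α) :
    (PySem.Set.ofList l).length = l.dedup.length := by
  refine List.Perm.length_eq ?_
  refine (List.perm_ext_iff_of_nodup (PySem.Set.nodup_ofList l) l.nodup_dedup).mpr ?_
  intro x
  rw [PySem.Set.mem_ofList l x, List.mem_dedup]

lemma length_ofList_eq_iff_nodup {α : Type} [DecidableEq α] (l : List α) :
    (PySem.Set.ofList l).length = l.length ↔ l.Nodup := by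
  rw [length_ofList_eq_dedup]
  constructor
  · intro h
    have := List.Sublist.eq_of_length l.dedup_sublist h
    exact List.dedup_eq_self.mp this
  · intro h
    rw [List.Nodup.dedup h]

-- the B-side cardinality test says exactly that the distinct pairs have pairwise distinct keys,
-- which is the pairwise consistency of the original pair list
lemma card_test_iff_pairwise (pairs : List (Int × Int)) :
    ((PySem.Set.ofList ((PySem.Set.ofList pairs).map Prod.fst)).length =
      (PySem.Set.ofList pairs).length) ↔
    pairs.Pairwise (fun p q => p.1 = q.1 → p.2 = q.2) := by
  set S : List (Int × Int) := PySem.Set.ofList pairs with hS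
  have hlen : S.length = (S.map Prod.fst).length := by simp
  rw [hlen, length_ofList_eq_iff_nodup]
  have hSnd : S.Nodup := PySem.Set.nodup_ofList pairs
  constructor
  · intro hnd
    refine List.pairwise_iff_forall_sublist.mpr ?_
    intro p q hsub heq
    have hp : p ∈ pairs := hsub.subset (by simp)
    have hq : q ∈ pairs := hsub.subset (by simp)
    have hp' : p ∈ S := (PySem.Set.mem_ofList pairs p).mpr hp
    have hq' : q ∈ S := (PySem.Set.mem_ofList pairs q).mpr hq
    have : p = q := by
      by_contra hne
      exact hne (List.inj_on_of_nodup_map hnd hp' hq' heq)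
    rw [this]
  · intro hPW
    have hforall : ∀ p ∈ pairs, ∀ q ∈ pairs, p.1 = q.1 → p.2 = q.2 := by
      intro p hp q hq heq
      by_cases hpq : p = q
      · rw [hpq]
      · have hsymm : Symmetric (fun p q : Int × Int => p.1 = q.1 → p.2 = q.2) := by
          intro x y h he; exact (h he.symm).symm
        exact List.Pairwise.forall hsymm hPW hp hq hpq heq
    refine List.Nodup.map_on ?_ hSnd
    intro p hp q hq heq
    have hp' : p ∈ pairs := (PySem.Set.mem_ofList pairs p).mp hp
    have hq' : q ∈ pairs := (PySem.Set.mem_ofList pairs q).mp hq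
    exact Prod.ext heq (hforall p hp' q hq' heq)

-- ===== VERDICT (by name: the statement is the Claim_ definition above) =====
theorem map_tensor_indices_py_spec : Claim_equal_map_tensor_indices_py := by
  intro I J _
  unfold Spec_map_tensor_indices_py map_tensor_indices_py map_tensor_indices_py_alt
  by_cases hl : I.length ≠ J.length
  · rw [if_pos hl, if_pos hl]
  · rw [if_neg hl, if_neg hl]
    set pairs := I.zip J with hpairs
    by_cases hpw : pairs.Pairwise (fun p q => p.1 = q.1 → p.2 = q.2)
    · have hgood : GoodMTI PySem.Dict.empty pairs := ⟨by simp, hpw⟩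
      rw [goA_of_good pairs PySem.Dict.empty hgood]
      rw [if_neg (fun h => h ((card_test_iff_pairwise pairs).mpr hpw))]
      rfl
    · have hnotgood : ¬ GoodMTI PySem.Dict.empty pairs := fun h => hpw h.2
      rw [goA_of_not_good pairs PySem.Dict.empty hnotgood]
      rw [if_pos (fun h => hpw ((card_test_iff_pairwise pairs).mp h))]
      rfl
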